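-- pv_equiv track=rewrite | github.com/AiYuXiWang/hk_tool_web | verify_fix.py | build_line_stats
-- ===== SOURCE A (Python) =====
-- from typing import Any, Dict, List, Tuple
--
-- def build_line_stats(stations: List[Dict[str, Any]]) -> Dict[str, List[str]]:
--     stats: Dict[str, List[str]] = {}
--     for station in stations:
--         line = station.get("line")
--         name = station.get("name")
--         if not isinstance(line, str) or not isinstance(name, str):
--             continue
--         stats.setdefault(line, []).append(name)
--     return stats
-- ===== SOURCE B (Python) =====
-- from typing import Any, Dict, List
--
-- def build_line_stats(stations: List[Dict[str, Any]]) -> Dict[str, List[str]]: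
--     pairs = [(st.get("line"), st.get("name")) for st in stations]
--     valid = [(l, n) for l, n in pairs if isinstance(l, str) and isinstance(n, str)]
--     keys = dict.fromkeys(l for l, _ in valid)
--     return {line: [n for l, n in valid if l == line] for line in keys}
-- ===== Notes on version B (the rewrite author's own statement) =====
-- stated objective: idiomatic
-- what changed: Replaces A's single pass with setdefault-append by a pipeline: extract (line, name) pairs, filter the valid ones, dedupe the line keys in first-appearance order, and build the result with a dict comprehension that re-scans the pair list per key.
import Mathlib
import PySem

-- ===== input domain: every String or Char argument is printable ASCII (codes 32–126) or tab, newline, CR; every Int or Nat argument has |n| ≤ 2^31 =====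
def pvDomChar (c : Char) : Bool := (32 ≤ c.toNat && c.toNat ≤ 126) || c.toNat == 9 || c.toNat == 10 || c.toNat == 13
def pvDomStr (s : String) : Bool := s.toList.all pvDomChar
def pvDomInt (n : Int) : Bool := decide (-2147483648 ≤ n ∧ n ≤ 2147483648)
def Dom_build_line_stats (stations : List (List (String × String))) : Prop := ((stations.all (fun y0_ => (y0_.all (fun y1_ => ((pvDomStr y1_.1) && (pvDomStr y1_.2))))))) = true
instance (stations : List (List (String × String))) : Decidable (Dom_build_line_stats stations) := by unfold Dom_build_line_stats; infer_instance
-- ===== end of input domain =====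

-- B restructures A's single setdefault-append pass as an extract/filter/dedup-keys/group-per-key pipeline (idiomatic; return value proved equal).


-- ===== PORT A =====
-- A: one pass; station.get("line")/get("name") (first match, none if absent);
-- values are Strings here, so the isinstance checks only fail when a key is missing;
-- stats.setdefault(line, []).append(name) is modify line [] (· ++ [name]).
def build_line_stats (stations : List (List (String × String))) : List (String × List String) :=
  (stations.foldl (fun stats station =>
      match (PySem.Dict.mk station).get? "line", (PySem.Dict.mk station).get? "name" with
      | some line, some name => stats.modify line [] (fun v => v ++ [name])
      | _, _ => stats)
    PySem.Dict.empty).items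

-- ===== PORT B =====
-- B: pairs, then the valid ones, then first-appearance keys (dict.fromkeys = dedup),
-- then one group per key by filtering the valid pairs.
-- B-side helper: keep a pair only when both components are present (the isinstance filter)
def pvBoth (p : Option String × Option String) : Option (String × String) :=
  p.1.bind (fun l => p.2.map (fun n => (l, n)))

def build_line_stats_alt (stations : List (List (String × String))) : List (String × List String) :=
  let pairs := stations.map (fun st =>
      ((PySem.Dict.mk st).get? "line", (PySem.Dict.mk st).get? "name"))
  let valid := pairs.filterMap pvBoth
  let keys := PySem.List.dedup (valid.map (fun p => p.1))
  keys.map (fun line => (line, (valid.filter (fun p => p.1 == line)).map (fun p => p.2)))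

-- ===== PRECONDITION & SPEC =====
def Spec_build_line_stats (stations : List (List (String × String))) (out : List (String × List String)) : Prop := out = build_line_stats_alt stations
instance (stations : List (List (String × String))) (out : List (String × List String)) : Decidable (Spec_build_line_stats stations out) := by unfold Spec_build_line_stats; infer_instance

-- ===== CLAIM (what is proved, stated in full; the proofs are below) =====
def Claim_equal_build_line_stats : Prop := ∀ (stations : List (List (String × String))), Dom_build_line_stats stations → Spec_build_line_stats stations (build_line_stats stations)

-- ===== LEMMAS AND PROOFS =====

-- the valid (line, name) pairs B extracts
def pvValid (stations : List (List (String × String))) : List (String × String) :=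
  (stations.map (fun st =>
      ((PySem.Dict.mk st).get? "line", (PySem.Dict.mk st).get? "name"))).filterMap pvBoth

-- A's fold over stations is the grouping fold over the valid pairs
lemma pvFoldA_eq (stations : List (List (String × String)))
    (d : PySem.Dict String (List String)) :
    stations.foldl (fun stats station =>
      match (PySem.Dict.mk station).get? "line", (PySem.Dict.mk station).get? "name" with
      | some line, some name => stats.modify line [] (fun v => v ++ [name])
      | _, _ => stats) d
    = (pvValid stations).foldl (fun d p => d.modify p.1 [] (fun v => v ++ [p.2])) d := by
  induction stations generalizing d with
  | nil => rfl
  | cons st rest ih =>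
      simp only [pvValid, List.map_cons, List.filterMap_cons] at ih ⊢
      cases hl : (PySem.Dict.mk st).get? "line" <;>
        cases hn : (PySem.Dict.mk st).get? "name" <;>
        simp only [List.foldl_cons, hl, hn, pvBoth, Option.bind_some, Option.bind_none,
          Option.map_some, Option.map_none] <;> exact ih _

-- keys of an insert, as Python-set add
lemma pvKeys_insert (d : PySem.Dict String (List String)) (k : String) (v : List String) :
    (d.insert k v).keys = PySem.Set.add d.keys k := by
  by_cases h : d.contains k = true
  · rw [PySem.Dict.keys_insert_of_contains d v h, PySem.Set.add]
    have hm : k ∈ d.keys := (PySem.Dict.contains_iff_mem_keys d k).mp h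
    simp [hm]
  · rw [PySem.Dict.keys_insert_of_not_contains d v (by simpa using h), PySem.Set.add]
    have hm : k ∉ d.keys := fun hk => h ((PySem.Dict.contains_iff_mem_keys d k).mpr hk)
    simp [hm]

-- keys of the grouping fold
lemma pvKeys_fold (ps : List (String × String)) (d : PySem.Dict String (List String)) :
    (ps.foldl (fun d p => d.modify p.1 [] (fun v => v ++ [p.2])) d).keys
      = PySem.Set.update d.keys (ps.map (fun p => p.1)) := by
  induction ps generalizing d with
  | nil => rfl
  | cons p rest ih =>
      simp only [List.foldl_cons, List.map_cons, PySem.Set.update]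
      rw [ih, PySem.Dict.keys_modify, pvKeys_insert]
      rfl

-- items of a dict with nodup keys, as a map over its keys
lemma pvItems_eq_map_keys (d : PySem.Dict String (List String))
    (h : d.keys.Nodup) :
    d.items = d.keys.map (fun k => (k, d.getD k [])) := by
  unfold PySem.Dict.keys
  rw [List.map_map]
  conv_lhs => rw [← List.map_id d.items]
  refine List.map_congr_left (fun p hp => ?_)
  have := PySem.Dict.getD_of_mem_items d (k := p.1) (v := p.2) (by simpa using hp) h []
  simp [Function.comp, this]

-- ===== VERDICT (by name: the statement is the Claim_ definition above) =====
theorem build_line_stats_spec : Claim_equal_build_line_stats := by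
  intro stations _
  unfold Spec_build_line_stats build_line_stats build_line_stats_alt
  rw [pvFoldA_eq]
  set ps := pvValid stations with hps
  have hkeys : (ps.foldl (fun d p => d.modify p.1 [] (fun v => v ++ [p.2]))
      PySem.Dict.empty).keys = PySem.List.dedup (ps.map (fun p => p.1)) := by
    rw [pvKeys_fold]
    simp [PySem.Dict.keys_empty, PySem.Set.update, PySem.List.dedup_eq_ofList,
      PySem.Set.ofList, PySem.Set.empty]
  have hnodup : (ps.foldl (fun d p => d.modify p.1 [] (fun v => v ++ [p.2]))
      PySem.Dict.empty).keys.Nodup := by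
    rw [hkeys]; exact PySem.List.nodup_dedup _
  rw [pvItems_eq_map_keys _ hnodup, hkeys]
  refine (List.map_congr_left (fun k _ => ?_)).symm
  rw [PySem.Dict.getD_foldl_modify_append]
  simp [PySem.Dict.getD_empty, hps, pvValid, List.filterMap_map]
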